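-- pv_equiv track=rewrite | github.com/devSaifur/python-101 | list/21. Double the string/main.py | double_string
-- ===== SOURCE A (Python) =====
-- def double_string(sentence):
--     words = sentence.split(" ")
--
--     doubled_sentences = []
--
--     # doubling the words
--     for i in range(0, len(words)):
--         double_words = []
--         doubled_sentences.insert(i, double_words)
--         for latter in words[i]:
--             double_word = "".join(latter) + "".join(latter)
--             double_words.append(double_word)
--
--     full_sentence = []
--
--     # joining all together
--     for sentence in doubled_sentences:
--         full_sentence.append("".join(sentence))
--
--     string = "  ".join(full_sentence)
--
--     return string
-- ===== SOURCE B (Python) =====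
-- def double_string(sentence):
--     # one flat pass over the characters: doubling the single spaces
--     # reproduces exactly the double-space join of the space-split words
--     return "".join(c + c for c in sentence)
-- ===== Notes on version B (the rewrite author's own statement) =====
-- stated objective: simpler
-- what changed: B replaces the split-on-space / per-word doubling / double-space-join pipeline by a single flat pass doubling every character, since doubling a space yields exactly the double-space separator.
import Mathlib
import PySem

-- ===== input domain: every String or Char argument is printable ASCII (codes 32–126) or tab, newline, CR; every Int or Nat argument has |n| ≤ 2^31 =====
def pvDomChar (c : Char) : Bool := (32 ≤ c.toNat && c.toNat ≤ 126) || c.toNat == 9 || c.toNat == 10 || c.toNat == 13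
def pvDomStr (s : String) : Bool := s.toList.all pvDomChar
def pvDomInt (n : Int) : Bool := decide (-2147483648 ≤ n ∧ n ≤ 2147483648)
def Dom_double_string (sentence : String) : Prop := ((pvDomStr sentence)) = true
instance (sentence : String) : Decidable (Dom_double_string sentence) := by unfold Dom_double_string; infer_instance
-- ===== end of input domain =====

-- B doubles every character in one flat pass; A splits on " ", doubles per word and joins with "  " — same value.

-- ===== PORT A =====
-- inner loop of A: double_words built by appending latter+latter for each char of the word
def doubleWordsA (w : String) : List String :=
  w.toList.foldl
    (fun dw latter =>
      dw ++ [PySem.Str.join "" [String.ofList [latter]] ++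
             PySem.Str.join "" [String.ofList [latter]]])
    []

-- outer loop of A: for i in range(0, len(words)): doubled_sentences.insert(i, double_words)
def doubledSentencesA (words : List String) : List (List String) :=
  (PySem.List.pyRange 0 (PySem.List.len words) 1).foldl
    (fun ds i => PySem.List.insert ds i (doubleWordsA (PySem.List.pyGetD words i "")))
    []

def double_string (sentence : String) : String :=
  PySem.Str.join "  "
    ((doubledSentencesA ((PySem.Str.split? sentence " ").getD [])).foldl
      (fun fs s => fs ++ [PySem.Str.join "" s]) [])

-- ===== PORT B =====
def double_string_alt (sentence : String) : String :=
  String.ofList (sentence.toList.flatMap (fun c => [c, c]))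

-- ===== PRECONDITION & SPEC =====
def Spec_double_string (sentence : String) (out : String) : Prop := out = double_string_alt sentence
instance (sentence : String) (out : String) : Decidable (Spec_double_string sentence out) := by unfold Spec_double_string; infer_instance

-- ===== CLAIM (what is proved, stated in full; the proofs are below) =====
def Claim_equal_double_string : Prop := ∀ (sentence : String), Dom_double_string sentence → Spec_double_string sentence (double_string sentence)

-- ===== LEMMAS AND PROOFS =====

/-- Pure structural recursion computing `PySem.Chars.splitOn l [' ']`. -/
def spSp : List Char → List (List Char)
  | [] => [[]]
  | c :: rest =>
    if c = ' ' then [] :: spSp rest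
    else
      match spSp rest with
      | [] => [[c]]
      | h :: t => (c :: h) :: t

def consHead (p : List Char) : List (List Char) → List (List Char)
  | [] => [p]
  | h :: t => (p ++ h) :: t

theorem spSp_ne_nil (l : List Char) : spSp l ≠ [] := by
  cases l with
  | nil => simp [spSp]
  | cons c rest =>
    simp only [spSp]
    split_ifs
    · simp
    · cases h : spSp rest <;> simp

theorem go_spec : ∀ (fuel : Nat) (l cur : List Char) (acc : List (List Char)),
    l.length ≤ fuel →
    PySem.Chars.splitOn.go [' '] fuel l cur acc = acc.reverse ++ consHead cur.reverse (spSp l) := by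
  intro fuel
  induction fuel with
  | zero =>
    intro l cur acc hl
    have : l = [] := by cases l <;> simp_all
    subst this
    simp [PySem.Chars.splitOn.go, spSp, consHead]
  | succ n ih =>
    intro l cur acc hl
    cases l with
    | nil => simp [PySem.Chars.splitOn.go, spSp, consHead]
    | cons c rest =>
      rw [PySem.Chars.splitOn.go]
      by_cases hc : c = ' '
      · subst hc
        have hpre : [' '].isPrefixOf (' ' :: rest) = true := by simp [List.isPrefixOf]
        rw [if_pos hpre]
        simp only [List.length_cons] at hl
        rw [ih _ _ _ (by simpa using hl)]
        have h1 : spSp (' ' :: rest) = [] :: spSp rest := by simp [spSp]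
        rw [h1]
        obtain ⟨h, t, ht⟩ : ∃ h t, spSp rest = h :: t := by
          cases hh : spSp rest with
          | nil => exact absurd hh (spSp_ne_nil rest)
          | cons h t => exact ⟨h, t, rfl⟩
        simp [ht, consHead]
      · have hpre : [' '].isPrefixOf (c :: rest) = false := by
          simp [List.isPrefixOf]
          exact fun h => absurd h.symm hc
        rw [if_neg (by simp [hpre])]
        simp only [List.length_cons] at hl
        rw [ih _ _ _ (by omega)]
        have h1 : spSp (c :: rest) =
            match spSp rest with
            | [] => [[c]]
            | h :: t => (c :: h) :: t := by simp [spSp, hc]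
        obtain ⟨h, t, ht⟩ : ∃ h t, spSp rest = h :: t := by
          cases hh : spSp rest with
          | nil => exact absurd hh (spSp_ne_nil rest)
          | cons h t => exact ⟨h, t, rfl⟩
        rw [h1, ht]
        simp [consHead]

theorem splitOn_space_eq_spSp (l : List Char) :
    PySem.Chars.splitOn l [' '] = spSp l := by
  rw [PySem.Chars.splitOn, go_spec _ _ _ _ (by omega)]
  obtain ⟨h, t, ht⟩ : ∃ h t, spSp l = h :: t := by
    cases hh : spSp l with
    | nil => exact absurd hh (spSp_ne_nil l)
    | cons h t => exact ⟨h, t, rfl⟩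
  simp [ht, consHead]

/-- A `append one element` foldl is `init ++ map`. -/
theorem foldl_push {α β : Type} (f : α → β) :
    ∀ (l : List α) (init : List β),
      l.foldl (fun acc x => acc ++ [f x]) init = init ++ l.map f := by
  intro l
  induction l with
  | nil => simp
  | cons x xs ih => intro init; simp [ih]

theorem join_nil_eq_flatten (xs : List (List Char)) :
    PySem.Chars.join [] xs = xs.flatten := by
  induction xs with
  | nil => simp [PySem.Chars.join_nil]
  | cons a t ih =>
    cases t with
    | nil => simp [PySem.Chars.join_singleton]
    | cons b r => rw [PySem.Chars.join_cons_cons]; simp at ih ⊢; simpa using ih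

theorem join_cons_append (sep a h : List Char) (t : List (List Char)) :
    PySem.Chars.join sep ((a ++ h) :: t) = a ++ PySem.Chars.join sep (h :: t) := by
  cases t with
  | nil => simp [PySem.Chars.join_singleton]
  | cons b r => rw [PySem.Chars.join_cons_cons, PySem.Chars.join_cons_cons]; simp

/-- key fact: double-space-joining the per-word doublings of the space split is doubling every char -/
theorem join_spSp (l : List Char) :
    PySem.Chars.join [' ', ' ']
      ((spSp l).map (fun w => w.flatMap (fun c => [c, c]))) =
    l.flatMap (fun c => [c, c]) := by
  induction l with
  | nil => simp [spSp, PySem.Chars.join_singleton]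
  | cons c rest ih =>
    obtain ⟨h, t, ht⟩ : ∃ h t, spSp rest = h :: t := by
      cases hh : spSp rest with
      | nil => exact absurd hh (spSp_ne_nil rest)
      | cons h t => exact ⟨h, t, rfl⟩
    by_cases hc : c = ' '
    · subst hc
      have h1 : spSp (' ' :: rest) = [] :: spSp rest := by simp [spSp]
      rw [h1, ht]
      rw [List.map_cons, List.map_cons, PySem.Chars.join_cons_cons]
      rw [ht] at ih
      simp only [List.map_cons] at ih
      simp [ih]
    · have h1 : spSp (c :: rest) = (c :: h) :: t := by simp [spSp, hc, ht]
      rw [h1, List.map_cons]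
      have h2 : (c :: h).flatMap (fun c => [c, c]) = [c, c] ++ h.flatMap (fun c => [c, c]) := by
        simp
      rw [h2, join_cons_append]
      rw [ht] at ih
      simp only [List.map_cons] at ih
      simp [ih]

theorem outer_loop (words : List String) (g : String → List String) :
    ∀ (n a : Nat) (ds : List (List String)), ds.length = a → a + n = words.length →
      (PySem.List.pyRange a words.length).foldl
        (fun ds i => PySem.List.insert ds i (g (PySem.List.pyGetD words i ""))) ds
      = ds ++ (words.drop a).map g := by
  intro n
  induction n with
  | zero =>
    intro a ds hds hn
    rw [show PySem.List.pyRange (a : Int) (words.length : Int) = [] from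
        PySem.List.pyRange_one_eq_nil (by omega)]
    simp [List.drop_eq_nil_of_le (by omega : words.length ≤ a)]
  | succ n ih =>
    intro a ds hds hn
    have ha : a < words.length := by omega
    rw [PySem.List.pyRange_one_cons (by exact_mod_cast ha)]
    simp only [List.foldl_cons]
    have h1 : PySem.List.pyGetD words (a : Int) "" = words[a] := by
      rw [PySem.List.pyGetD_natCast]
      exact List.getD_eq_getElem words "" ha
    have hlen : (a : Int) = PySem.List.len ds := by simp [PySem.List.len, hds]
    have h2 : ∀ x : List String, PySem.List.insert ds (a : Int) x = ds ++ [x] := by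
      intro x; rw [hlen]; exact PySem.List.insert_len ds x
    rw [h2, h1]
    have h3 : ((a : Int) + 1) = ((a + 1 : Nat) : Int) := by push_cast; ring
    rw [h3, ih (a + 1) _ (by simp [hds]) (by omega)]
    rw [List.drop_eq_getElem_cons ha, List.map_cons]
    simp

theorem str_join_empty_singleton (s : String) : PySem.Str.join "" [s] = s := by
  simp [PySem.Str.join, PySem.Chars.join_singleton]

theorem doubleWordsA_ofList (w : List Char) :
    doubleWordsA (String.ofList w) = w.map (fun c => String.ofList [c, c]) := by
  unfold doubleWordsA
  rw [foldl_push (fun latter => PySem.Str.join "" [String.ofList [latter]] ++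
                                PySem.Str.join "" [String.ofList [latter]])]
  simp only [List.nil_append, String.toList_ofList]
  refine List.map_congr_left fun c _ => ?_
  rw [str_join_empty_singleton]
  apply String.toList_injective
  simp

theorem doubledSentencesA_eq_map (words : List String) :
    doubledSentencesA words = words.map doubleWordsA := by
  unfold doubledSentencesA
  have h : PySem.List.len words = (words.length : Int) := rfl
  rw [h]
  simpa using outer_loop words doubleWordsA words.length 0 [] rfl (by omega)

-- ===== VERDICT (by name: the statement is the Claim_ definition above) =====
theorem double_string_spec : Claim_equal_double_string := by
  intro sentence _
  unfold Spec_double_string double_string double_string_alt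
  have hwords : (PySem.Str.split? sentence " ").getD [] =
      (spSp sentence.toList).map String.ofList := by
    simp [PySem.Str.split?, PySem.Chars.split?, splitOn_space_eq_spSp]
  rw [hwords, doubledSentencesA_eq_map, foldl_push (fun s => PySem.Str.join "" s)]
  simp only [List.nil_append, List.map_map]
  rw [show ∀ parts, PySem.Str.join "  " parts =
      String.ofList (PySem.Chars.join [' ', ' '] (parts.map String.toList)) from fun _ => rfl]
  simp only [List.map_map]
  have hstep : ∀ w ∈ spSp sentence.toList,
      (String.toList ∘ ((fun s => PySem.Str.join "" s) ∘ doubleWordsA ∘ String.ofList)) w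
      = w.flatMap (fun c => [c, c]) := by
    intro w _
    simp only [Function.comp_apply, doubleWordsA_ofList]
    rw [show PySem.Str.join "" (w.map fun c => String.ofList [c, c]) =
        String.ofList (PySem.Chars.join [] ((w.map fun c => String.ofList [c, c]).map String.toList)) from rfl]
    simp only [String.toList_ofList, List.map_map]
    have hchar : (String.toList ∘ fun c : Char => String.ofList [c, c]) =
        fun c : Char => [c, c] := by
      funext c; simp
    rw [hchar, join_nil_eq_flatten, ← List.flatMap_def]
  rw [List.map_congr_left hstep]
  exact congrArg String.ofList (join_spSp sentence.toList)
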